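-- pv_equiv track=rewrite | github.com/wadansyaku/cheekschecker | scripts/ci/check_workflows.py | _workflow_step_blocks
-- ===== SOURCE A (Python) =====
-- def _workflow_step_blocks(lines: list[str]) -> list[tuple[int, list[str]]]:
--     blocks: list[tuple[int, list[str]]] = []
--     current_start: int | None = None
--     current: list[str] = []
--
--     for line_number, line in enumerate(lines, start=1):
--         stripped = line.lstrip()
--         if stripped.startswith("- name:"):
--             if current_start is not None:
--                 blocks.append((current_start, current))
--             current_start = line_number
--             current = [line]
--             continue
--         if current_start is not None:
--             current.append(line)
--
--     if current_start is not None: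
--         blocks.append((current_start, current))
--     return blocks
-- ===== SOURCE B (Python) =====
-- def _workflow_step_blocks(lines: list[str]) -> list[tuple[int, list[str]]]:
--     blocks: list[tuple[int, list[str]]] = []
--     pending: list[str] = []
--     for line_number, line in reversed(list(enumerate(lines, start=1))):
--         if line.lstrip().startswith("- name:"):
--             blocks.append((line_number, [line] + pending[::-1]))
--             pending = []
--         else:
--             pending.append(line)
--     blocks.reverse()
--     return blocks
-- ===== Notes on version B (the rewrite author's own statement) =====
-- stated objective: alternative
-- what changed: B iterates the enumerated lines in reverse, prepending non-name lines to a pending buffer and emitting a block whenever a '- name:' line is met, so the Option start-state and the trailing flush of A disappear.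
import Mathlib
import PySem

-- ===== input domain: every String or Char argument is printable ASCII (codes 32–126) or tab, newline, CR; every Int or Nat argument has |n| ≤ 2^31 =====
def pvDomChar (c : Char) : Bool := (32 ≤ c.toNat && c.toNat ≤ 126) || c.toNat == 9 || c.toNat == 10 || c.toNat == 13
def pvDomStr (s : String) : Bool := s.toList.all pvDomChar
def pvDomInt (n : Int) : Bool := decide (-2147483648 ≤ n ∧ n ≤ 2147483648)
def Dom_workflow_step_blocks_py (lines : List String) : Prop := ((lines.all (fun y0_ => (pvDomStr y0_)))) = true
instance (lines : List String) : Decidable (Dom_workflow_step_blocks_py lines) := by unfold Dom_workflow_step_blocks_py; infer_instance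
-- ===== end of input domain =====

-- B replaces A's forward loop with Option start-state and final flush by a single reverse
-- pass with a pending buffer (alternative decomposition, same cost); return value only.

-- ===== PORT A =====
def stepA (st : List (Int × List String) × Option Int × List String) (p : Int × String) :
    List (Int × List String) × Option Int × List String :=
  if PySem.Str.startswith (PySem.Str.lstrip p.2) "- name:" then
    (match st.2.1 with
      | some s => st.1 ++ [(s, st.2.2)]
      | none => st.1, some p.1, [p.2])
  else
    match st.2.1 with
    | some s => (st.1, some s, st.2.2 ++ [p.2])
    | none => (st.1, none, st.2.2)

def workflow_step_blocks_py (lines : List String) : List (Int × List String) :=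
  let st := (PySem.List.enumerate lines 1).foldl stepA ([], none, [])
  match st.2.1 with
  | some s => st.1 ++ [(s, st.2.2)]
  | none => st.1

-- ===== PORT B =====
def stepB (st : List (Int × List String) × List String) (p : Int × String) :
    List (Int × List String) × List String :=
  if PySem.Str.startswith (PySem.Str.lstrip p.2) "- name:" then
    (st.1 ++ [(p.1, p.2 :: st.2.reverse)], [])
  else
    (st.1, st.2 ++ [p.2])

def workflow_step_blocks_py_alt (lines : List String) : List (Int × List String) :=
  ((((PySem.List.enumerate lines 1).reverse).foldl stepB ([], [])).1).reverse

-- ===== PRECONDITION & SPEC =====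
def Spec_workflow_step_blocks_py (lines : List String) (out : List (Int × List String)) : Prop := out = workflow_step_blocks_py_alt lines
instance (lines : List String) (out : List (Int × List String)) : Decidable (Spec_workflow_step_blocks_py lines out) := by unfold Spec_workflow_step_blocks_py; infer_instance

-- ===== CLAIM (what is proved, stated in full; the proofs are below) =====
def Claim_equal_workflow_step_blocks_py : Prop := ∀ (lines : List String), Dom_workflow_step_blocks_py lines → Spec_workflow_step_blocks_py lines (workflow_step_blocks_py lines)

-- ===== LEMMAS AND PROOFS =====

-- proof helpers
def isName (l : String) : Bool := PySem.Str.startswith (PySem.Str.lstrip l) "- name:"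

def finalizeA (st : List (Int × List String) × Option Int × List String) : List (Int × List String) :=
  match st.2.1 with
  | some s => st.1 ++ [(s, st.2.2)]
  | none => st.1

-- common recursive characterisation of the grouping
def blocksRec : List String → Int → List (Int × List String)
  | [], _ => []
  | l :: rest, n =>
    if isName l then
      (n, l :: rest.takeWhile (fun x => !isName x)) ::
        blocksRec (rest.dropWhile (fun x => !isName x))
          (n + 1 + (rest.takeWhile (fun x => !isName x)).length)
    else blocksRec rest (n + 1)
termination_by l _ => l.length
decreasing_by
  · exact Nat.lt_succ_of_le (List.length_dropWhile_le _ _)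
  · simp

theorem blocksRec_nil (n : Int) : blocksRec [] n = [] := by
  rw [blocksRec]

theorem foldA_blocks (es : List (Int × String)) (blocks : List (Int × List String))
    (cs : Option Int) (cur : List String) :
    List.foldl stepA (blocks, cs, cur) es =
      (blocks ++ (List.foldl stepA (([] : List (Int × List String)), cs, cur) es).1,
        (List.foldl stepA (([] : List (Int × List String)), cs, cur) es).2) := by
  induction es generalizing blocks cs cur with
  | nil => simp
  | cons e t ih =>
    simp only [List.foldl_cons]
    rw [ih, ih ((stepA ([], cs, cur) e).1)]
    cases cs with
    | none =>
      by_cases h : isName e.2 = true <;>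
        simp [stepA, isName] at h ⊢ <;> simp [h]
    | some s =>
      by_cases h : isName e.2 = true <;>
        simp [stepA, isName] at h ⊢ <;> simp [h]

theorem finalizeA_append (b1 b2 : List (Int × List String)) (cs : Option Int) (cur : List String) :
    finalizeA (b1 ++ b2, cs, cur) = b1 ++ finalizeA (b2, cs, cur) := by
  cases cs <;> simp [finalizeA]

theorem foldA_some (rest : List String) (s : Int) (cur : List String) (n : Int) :
    finalizeA (List.foldl stepA (([] : List (Int × List String)), some s, cur)
        (PySem.List.enumerate rest n)) =
      (s, cur ++ rest.takeWhile (fun x => !isName x)) ::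
        blocksRec (rest.dropWhile (fun x => !isName x))
          (n + (rest.takeWhile (fun x => !isName x)).length) := by
  induction rest generalizing s cur n with
  | nil => simp [PySem.List.enumerate_nil, finalizeA, blocksRec_nil]
  | cons l t ih =>
    rw [PySem.List.enumerate_cons, List.foldl_cons]
    by_cases h : isName l = true
    · have hs : stepA (([] : List (Int × List String)), some s, cur) (n, l) =
          ([(s, cur)], some n, [l]) := by
        simp [stepA, isName] at h ⊢; simp [h]
      rw [hs, foldA_blocks, finalizeA_append, ih]
      simp [blocksRec, h]
    · have hs : stepA (([] : List (Int × List String)), some s, cur) (n, l) =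
          ([], some s, cur ++ [l]) := by
        simp [stepA, isName] at h ⊢; simp [h]
      rw [hs, ih]
      simp [h]
      congr 1
      omega

theorem foldA_none (lines : List String) (cur : List String) (n : Int) :
    finalizeA (List.foldl stepA (([] : List (Int × List String)), none, cur)
        (PySem.List.enumerate lines n)) = blocksRec lines n := by
  induction lines generalizing cur n with
  | nil => simp [PySem.List.enumerate_nil, finalizeA, blocksRec_nil]
  | cons l t ih =>
    rw [PySem.List.enumerate_cons, List.foldl_cons]
    by_cases h : isName l = true
    · have hs : stepA (([] : List (Int × List String)), none, cur) (n, l) =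
          ([], some n, [l]) := by
        simp [stepA, isName] at h ⊢; simp [h]
      rw [hs, foldA_some]
      simp [blocksRec, h]
    · have hs : stepA (([] : List (Int × List String)), none, cur) (n, l) =
          ([], none, cur) := by
        simp [stepA, isName] at h ⊢; simp [h]
      rw [hs, ih]
      simp [blocksRec, h]

theorem foldB_char (lines : List String) (n : Int) :
    List.foldr (fun p st => stepB st p)
        (([] : List (Int × List String)), ([] : List String))
        (PySem.List.enumerate lines n) =
      ((blocksRec (lines.dropWhile (fun x => !isName x))
          (n + (lines.takeWhile (fun x => !isName x)).length)).reverse,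
        (lines.takeWhile (fun x => !isName x)).reverse) := by
  induction lines generalizing n with
  | nil => simp [PySem.List.enumerate_nil, blocksRec_nil]
  | cons l t ih =>
    rw [PySem.List.enumerate_cons, List.foldr_cons, ih]
    by_cases h : isName l = true
    · have hstep : stepB
          ((blocksRec (t.dropWhile (fun x => !isName x))
              (n + 1 + (t.takeWhile (fun x => !isName x)).length)).reverse,
            (t.takeWhile (fun x => !isName x)).reverse) (n, l) =
          ((blocksRec (t.dropWhile (fun x => !isName x))
              (n + 1 + (t.takeWhile (fun x => !isName x)).length)).reverse ++
            [(n, l :: t.takeWhile (fun x => !isName x))], []) := by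
        simp [stepB, isName] at h ⊢; simp [h]
      rw [hstep]
      simp [blocksRec, h]
    · have hstep : stepB
          ((blocksRec (t.dropWhile (fun x => !isName x))
              (n + 1 + (t.takeWhile (fun x => !isName x)).length)).reverse,
            (t.takeWhile (fun x => !isName x)).reverse) (n, l) =
          ((blocksRec (t.dropWhile (fun x => !isName x))
              (n + 1 + (t.takeWhile (fun x => !isName x)).length)).reverse,
            (t.takeWhile (fun x => !isName x)).reverse ++ [l]) := by
        simp [stepB, isName] at h ⊢; simp [h]
      rw [hstep]
      simp [h]
      congr 1
      omega

theorem blocksRec_skip (lines : List String) (n : Int) :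
    blocksRec lines n =
      blocksRec (lines.dropWhile (fun x => !isName x))
        (n + (lines.takeWhile (fun x => !isName x)).length) := by
  induction lines generalizing n with
  | nil => simp [blocksRec_nil]
  | cons l t ih =>
    by_cases h : isName l = true
    · simp [blocksRec, h]
    · rw [blocksRec]
      simp [h, ih]
      congr 1
      omega

-- ===== VERDICT (by name: the statement is the Claim_ definition above) =====
theorem workflow_step_blocks_py_spec : Claim_equal_workflow_step_blocks_py := by
  intro lines _
  unfold Spec_workflow_step_blocks_py workflow_step_blocks_py workflow_step_blocks_py_alt
  have hA : finalizeA ((PySem.List.enumerate lines 1).foldl stepA ([], none, [])) =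
      blocksRec lines 1 := foldA_none lines [] 1
  simp only [finalizeA] at hA
  rw [hA, List.foldl_reverse, foldB_char, ← blocksRec_skip, List.reverse_reverse]
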